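-- pv_equiv track=rewrite | github.com/vibhaalbus14/DSA | 395.minimiseTheMaximumDifferenceOfThePairs.py | minimizeMax
-- ===== SOURCE A (Python) =====
-- from typing import List
--
-- def minimizeMax(nums: List[int], p: int) -> int:
--
--     #approach
--     #dp with index and pairs formed so far will give TC of O(n*p) which is almost n**2
--     #next approach
--     #1.binary search over the values
--     #2.use every mid value as the threshold saying this can be the max ans if we find p pairs
--     #3.so by going over all the values in nums, we find if p pairs are psooible with diff<=threshold
--     #4.if yes, try to minimise the threshold since we have to minimize the the overall op
--     #5.if we cant find 'p' pairs within th egiven threshold, we increase the threshold val and repeat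
--     #6. final threshold is the answer
--
--     n=len(nums)
--
--     def checkPairsWithGivenThreshold(threshold):
--         #if we need to minimise the diff=> only adj values will help
--         i,count=0,0
--
--         while i<n-1:
--             if abs(nums[i]-nums[i+1])<=threshold:
--                 count+=1
--                 i+=2 #since i and i+1 are already paired we move to i+2
--                 if count==p:
--                     return True
--             else:
--                 i+=1
--         return False
--
--     nums.sort()
--     l=0 #dont initialse it to min(nums) as here we are trying identify threshold that can also be 0 and not nums[0] val
--     r=nums[-1]-nums[0] #why? since max threshold can never be greater than max-min given in nums
--     res=0
--
--     while l<=r: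
--         mid=(l+r)//2
--
--         #now mid val acts as threshold
--         #see if p pairs are possible with this threshold
--         if checkPairsWithGivenThreshold(mid):
--             #try to minimise
--             res=mid#initialise to res since valid pairs are found
--             r=mid-1
--
--         else:
--             #try to maximise
--             l=mid+1
--
--     return res
-- ===== SOURCE B (Python) =====
-- from typing import List
--
-- def minimizeMax(nums: List[int], p: int) -> int:
--     # Bottom-up DP over sorted suffixes: dp[k] = the minimum achievable maximum
--     # difference when forming k disjoint adjacent pairs in the current suffix
--     # (only adjacent elements of the sorted array are ever worth pairing).
--     nums.sort()
--     n = len(nums)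
--     if p <= 0 or 2 * p > n:
--         return 0
--     INF = nums[-1] - nums[0] + 1  # larger than any attainable pair difference
--     next2 = [0] + [INF] * p       # dp for the suffix starting at i + 2
--     next1 = [0] + [INF] * p       # dp for the suffix starting at i + 1
--     for i in range(n - 2, -1, -1):
--         d = nums[i + 1] - nums[i]
--         cur = [0] + [min(next1[k], max(d, next2[k - 1])) for k in range(1, p + 1)]
--         next2 = next1
--         next1 = cur
--     return next1[p]
-- ===== Notes on version B (the rewrite author's own statement) =====
-- stated objective: alternative
-- what changed: Replaces A's binary search over the numeric threshold range with its greedy adjacent-pairing feasibility check by a bottom-up dynamic program over sorted suffixes (dp[k] = minimum achievable maximum difference forming k disjoint adjacent pairs), with an explicit feasibility pre-check.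
-- crash fix: On an empty nums A raises IndexError at nums[-1]; B returns 0. — e.g. on minimizeMax([], 1): A raises IndexError, B returns 0
import Mathlib
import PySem

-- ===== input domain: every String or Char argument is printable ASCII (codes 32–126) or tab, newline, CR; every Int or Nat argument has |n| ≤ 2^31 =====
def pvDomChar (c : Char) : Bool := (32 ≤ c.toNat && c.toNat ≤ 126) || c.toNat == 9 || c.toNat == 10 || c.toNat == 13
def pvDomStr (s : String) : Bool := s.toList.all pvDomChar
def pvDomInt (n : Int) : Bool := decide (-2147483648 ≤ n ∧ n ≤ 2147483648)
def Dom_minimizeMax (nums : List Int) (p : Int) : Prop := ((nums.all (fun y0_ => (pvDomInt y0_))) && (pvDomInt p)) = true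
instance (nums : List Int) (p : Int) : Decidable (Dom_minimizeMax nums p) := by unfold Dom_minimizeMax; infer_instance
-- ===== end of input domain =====

-- B replaces A's binary search over the threshold value range (with its greedy adjacent-pairing
-- feasibility check) by a bottom-up dynamic program over sorted suffixes; like A, B sorts `nums`
-- in place. Equivalence is about the return value; both perform the same in-place sort.


-- ===== PORT A =====
-- A's inner `while i < n-1` with state (i, count), early return True at count == p;
-- the Nat argument is fuel that only makes the loop total (i advances by ≥ 1 while
-- i < n-1, so `s.length` steps always suffice; proved in check_iff_aux below)
def minimizeMaxCheck (s : List Int) (p thr : Int) : Nat → Int → Int → Bool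
  | 0, _, _ => false
  | fuel + 1, i, count =>
    if i < (s.length : Int) - 1 then
      if |PySem.List.pyGetD s i 0 - PySem.List.pyGetD s (i + 1) 0| ≤ thr then
        if count + 1 = p then true
        else minimizeMaxCheck s p thr fuel (i + 2) (count + 1)
      else minimizeMaxCheck s p thr fuel (i + 1) count
    else false

-- A's `while l <= r` binary search over threshold values, with running best `res`;
-- the Nat argument is fuel (the interval [l, r] shrinks by ≥ 1 per step, so
-- `(r - l + 1).toNat` steps always suffice; proved in bsLoop_post_aux below)
def minimizeMaxLoop (s : List Int) (p : Int) : Nat → Int → Int → Int → Int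
  | 0, _, _, res => res
  | fuel + 1, l, r, res =>
    if l ≤ r then
      let mid := PySem.Int.floordiv (l + r) 2
      if minimizeMaxCheck s p mid s.length 0 0 then
        minimizeMaxLoop s p fuel l (mid - 1) mid
      else
        minimizeMaxLoop s p fuel (mid + 1) r res
    else res

def minimizeMax (nums : List Int) (p : Int) : Int :=
  let s := PySem.List.sorted nums (fun x => x) false
  let r := PySem.List.pyGetD s (-1) 0 - PySem.List.pyGetD s 0 0
  minimizeMaxLoop s p (r + 1).toNat 0 r 0

-- ===== PORT B =====
-- body of B's `for i in range(n-2, -1, -1)` loop: state = (next2, next1), builds cur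
def stepB (s : List Int) (p : Int) (st : List Int × List Int) (i : Int) : List Int × List Int :=
  let d := PySem.List.pyGetD s (i + 1) 0 - PySem.List.pyGetD s i 0
  let cur := 0 :: (PySem.List.pyRange 1 (p + 1) 1).map
    (fun k => min (PySem.List.pyGetD st.2 k 0) (max d (PySem.List.pyGetD st.1 (k - 1) 0)))
  (st.2, cur)

def minimizeMax_alt (nums : List Int) (p : Int) : Int :=
  let s := PySem.List.sorted nums (fun x => x) false
  let n : Int := s.length
  if p ≤ 0 ∨ 2 * p > n then 0
  else
    let I := PySem.List.pyGetD s (-1) 0 - PySem.List.pyGetD s 0 0 + 1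
    let init : List Int := 0 :: List.replicate p.toNat I
    let fin := (PySem.List.pyRange (n - 2) (-1) (-1)).foldl (stepB s p) (init, init)
    PySem.List.pyGetD fin.2 p 0

-- ===== PRECONDITION & SPEC =====
-- Pre_ excludes only the empty list, on which A raises IndexError at `nums[-1]`.
def Pre_minimizeMax (nums : List Int) (p : Int) : Prop := nums ≠ []
instance (nums : List Int) (p : Int) : Decidable (Pre_minimizeMax nums p) := by
  unfold Pre_minimizeMax; infer_instance

def pvWitness_minimizeMax : List Int × Int := ([10, 1, 2, 7, 1, 3], 2)

-- A raises IndexError on an empty nums (at `nums[-1]`); B returns 0 there (theorem minimizeMax_raises below).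
def Raises_minimizeMax (nums : List Int) (p : Int) : Prop := nums = []
instance (nums : List Int) (p : Int) : Decidable (Raises_minimizeMax nums p) := by
  unfold Raises_minimizeMax; infer_instance
def pvRaiseWitness_minimizeMax : List Int × Int := ([], 1)
def pvRaiseWitnessOut_minimizeMax : Int := 0

def Spec_minimizeMax (nums : List Int) (p : Int) (out : Int) : Prop := out = minimizeMax_alt nums p
instance (nums : List Int) (p : Int) (out : Int) : Decidable (Spec_minimizeMax nums p out) := by unfold Spec_minimizeMax; infer_instance

-- ===== CLAIM (what is proved, stated in full; the proofs are below) =====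
def Claim_equal_minimizeMax : Prop := ∀ (nums : List Int) (p : Int), Dom_minimizeMax nums p → Pre_minimizeMax nums p → Spec_minimizeMax nums p (minimizeMax nums p)

def Claim_raises_minimizeMax : Prop := (∀ (nums : List Int) (p : Int), Dom_minimizeMax nums p → Raises_minimizeMax nums p → ¬ Pre_minimizeMax nums p) ∧ (Dom_minimizeMax (pvRaiseWitness_minimizeMax.1) (pvRaiseWitness_minimizeMax.2) ∧ Raises_minimizeMax (pvRaiseWitness_minimizeMax.1) (pvRaiseWitness_minimizeMax.2) ∧ minimizeMax_alt (pvRaiseWitness_minimizeMax.1) (pvRaiseWitness_minimizeMax.2) = pvRaiseWitnessOut_minimizeMax)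

-- ===== LEMMAS AND PROOFS =====

-- greedy pair count at threshold t on a sorted list (A's check counts this)
def cntP (t : Int) : List Int → Int
  | x :: y :: r => if y - x ≤ t then cntP t r + 1 else cntP t (y :: r)
  | _ => 0

-- DP value: minimum achievable max difference forming k disjoint adjacent pairs (I = "infinity")
def fD (I : Int) : List Int → Nat → Int
  | _, 0 => 0
  | [], _ + 1 => I
  | [_], _ + 1 => I
  | x :: y :: r, k + 1 => min (fD I (y :: r) (k + 1)) (max (y - x) (fD I r k))

-- the dp row [fD I s 0, …, fD I s P]
def rowOf (I : Int) (P : Nat) (s : List Int) : List Int := (List.range (P + 1)).map (fD I s)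

-- adjacent differences
def adif : List Int → List Int
  | x :: y :: r => (y - x) :: adif (y :: r)
  | _ => []

theorem cntP_nonneg (t : Int) : ∀ (s : List Int), 0 ≤ cntP t s
  | [] => by simp [cntP]
  | [_] => by simp [cntP]
  | x :: y :: r => by
    have h1 := cntP_nonneg t r
    have h2 := cntP_nonneg t (y :: r)
    unfold cntP; split <;> omega

theorem cntP_short (t : Int) (s : List Int) (h : s.length ≤ 1) : cntP t s = 0 := by
  match s, h with
  | [], _ => rfl
  | [_], _ => rfl

theorem cntP_cons_bounds (t : Int) : ∀ (s : List Int) (y : Int),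
    cntP t s ≤ cntP t (y :: s) ∧ cntP t (y :: s) ≤ cntP t s + 1
  | [], y => by simp [cntP]
  | z :: rs, y => by
    have h := cntP_cons_bounds t rs z
    by_cases hzy : z - y ≤ t
    · simp only [cntP, if_pos hzy]
      omega
    · simp only [cntP, if_neg hzy]
      omega

theorem cntP_mono (t t' : Int) (h : t ≤ t') : ∀ (s : List Int), cntP t s ≤ cntP t' s
  | [] => by simp [cntP]
  | [_] => by simp [cntP]
  | x :: y :: r => by
    have ih1 := cntP_mono t t' h r
    have ih2 := cntP_mono t t' h (y :: r)
    have hb := cntP_cons_bounds t r y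
    unfold cntP
    split_ifs with h1 h2 <;> omega

theorem cntP_le_half (t : Int) : ∀ (s : List Int), 2 * cntP t s ≤ (s.length : Int)
  | [] => by simp [cntP]
  | [_] => by simp [cntP]
  | x :: y :: r => by
    have ih1 := cntP_le_half t r
    have ih2 := cntP_le_half t (y :: r)
    simp only [List.length_cons] at *
    unfold cntP
    split_ifs with h1 <;> push_cast <;> push_cast at ih1 ih2 <;> omega

theorem mem_adif_cons (y : Int) : ∀ (r : List Int) (d : Int), d ∈ adif r → d ∈ adif (y :: r)
  | [], d, h => by simp [adif] at h
  | z :: rs, d, h => by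
    simp only [adif, List.mem_cons]
    right; exact h

theorem cntP_ge_of_all_le (t : Int) : ∀ (s : List Int),
    (∀ d ∈ adif s, d ≤ t) → (s.length : Int) - 1 ≤ 2 * cntP t s
  | [], _ => by simp [cntP]
  | [_], _ => by simp [cntP]
  | x :: y :: r, h => by
    have hxy : y - x ≤ t := h _ (by simp [adif])
    have ih := cntP_ge_of_all_le t r (fun d hd =>
      h d (by simp only [adif, List.mem_cons]; right; exact mem_adif_cons y r d hd))
    simp only [List.length_cons] at *
    unfold cntP
    rw [if_pos hxy]
    push_cast
    push_cast at ih
    omega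

theorem length_adif : ∀ (s : List Int), (adif s).length = s.length - 1
  | [] => rfl
  | [_] => rfl
  | x :: y :: r => by
    have := length_adif (y :: r)
    simp only [adif, List.length_cons] at *
    omega

theorem getElem_adif : ∀ (s : List Int) (k : Nat) (hk : k + 1 < s.length),
    (adif s)[k]'(by rw [length_adif]; omega) = s[k + 1] - s[k]
  | x :: y :: r, 0, _ => rfl
  | x :: y :: r, k + 1, hk => by
    have ih := getElem_adif (y :: r) k (by simpa using Nat.lt_of_succ_lt_succ hk)
    simp only [adif, List.getElem_cons_succ]
    exact ih

theorem mem_adif (s : List Int) (d : Int) :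
    d ∈ adif s ↔ ∃ k : Nat, ∃ hk : k + 1 < s.length, d = s[k + 1] - s[k] := by
  rw [List.mem_iff_getElem]
  constructor
  · rintro ⟨k, hk, rfl⟩
    have hk' : k + 1 < s.length := by have := length_adif s; omega
    exact ⟨k, hk', getElem_adif s k hk'⟩
  · rintro ⟨k, hk, rfl⟩
    exact ⟨k, by rw [length_adif]; omega, getElem_adif s k hk⟩

-- the DP value is the least feasible threshold: fD ≤ t ↔ the greedy finds k pairs at t
theorem fD_le_iff (I t : Int) (h0 : 0 ≤ t) (hI : t < I) :
    ∀ (s : List Int) (k : Nat), (fD I s k ≤ t ↔ (k : Int) ≤ cntP t s)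
  | s, 0 => by
    have := cntP_nonneg t s
    simp [fD]
    omega
  | [], k + 1 => by
    simp only [fD, cntP]
    constructor
    · intro h; omega
    · intro h; push_cast at h; omega
  | [x], k + 1 => by
    simp only [fD, cntP]
    constructor
    · intro h; omega
    · intro h; push_cast at h; omega
  | x :: y :: r, k + 1 => by
    have ih1 := fD_le_iff I t h0 hI (y :: r) (k + 1)
    have ih2 := fD_le_iff I t h0 hI r k
    have hb := cntP_cons_bounds t r y
    simp only [fD, cntP, min_le_iff, max_le_iff]
    by_cases hxy : y - x ≤ t
    · rw [if_pos hxy]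
      constructor
      · rintro (h | ⟨_, h⟩)
        · have := ih1.mp h; omega
        · have := ih2.mp h; omega
      · intro h
        right
        exact ⟨hxy, ih2.mpr (by omega)⟩
    · rw [if_neg hxy]
      constructor
      · rintro (h | ⟨h, _⟩)
        · exact ih1.mp h
        · omega
      · intro h
        left
        exact ih1.mpr h
termination_by s _ => s.length

theorem fD_nonneg (I : Int) (hI : 0 ≤ I) :
    ∀ (s : List Int), s.Pairwise (· ≤ ·) → ∀ (k : Nat), 0 ≤ fD I s k
  | s, _, 0 => by simp [fD]
  | [], _, k + 1 => by simpa [fD] using hI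
  | [x], _, k + 1 => by simpa [fD] using hI
  | x :: y :: r, hs, k + 1 => by
    have hxy : x ≤ y := (List.pairwise_cons.mp hs).1 y (by simp)
    have h1 := fD_nonneg I hI (y :: r) hs.tail (k + 1)
    simp only [fD, le_min_iff, le_max_iff]
    exact ⟨h1, Or.inl (by omega)⟩
termination_by s _ _ => s.length

theorem rowOf_length (I : Int) (P : Nat) (s : List Int) : (rowOf I P s).length = P + 1 := by
  simp [rowOf]

theorem rowOf_get (I : Int) (P : Nat) (s : List Int) (k : Int) (h0 : 0 ≤ k) (hk : k ≤ (P : Int)) :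
    PySem.List.pyGetD (rowOf I P s) k 0 = fD I s k.toNat := by
  rw [PySem.List.pyGetD_eq_getElem _ _ h0 (by rw [rowOf_length]; omega)]
  simp [rowOf]

theorem init_row (I : Int) (P : Nat) (s : List Int) (h : s.length ≤ 1) :
    (0 :: List.replicate P I) = rowOf I P s := by
  apply List.ext_getElem
  · simp [rowOf_length]
  · intro j h1 h2
    rw [rowOf_length] at h2
    match j with
    | 0 =>
      match s, h with
      | [], _ => simp [rowOf, fD]
      | [x], _ => simp [rowOf, fD]
    | j + 1 =>
      have hrep : (0 :: List.replicate P I)[j + 1] = I := by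
        simp
      rw [hrep]
      match s, h with
      | [], _ => simp [rowOf, fD]
      | [x], _ => simp [rowOf, fD]

theorem stepB_row (s : List Int) (p I : Int) (P : Nat) (hp : p = (P : Int)) (i : Int)
    (h0 : 0 ≤ i) (hi : i ≤ (s.length : Int) - 2) :
    stepB s p (rowOf I P (s.drop (i + 2).toNat), rowOf I P (s.drop (i + 1).toNat)) i
      = (rowOf I P (s.drop (i + 1).toNat), rowOf I P (s.drop i.toNat)) := by
  have hk1 : i.toNat + 1 < s.length := by omega
  have hd1 : s.drop i.toNat = s[i.toNat] :: s.drop (i.toNat + 1) :=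
    List.drop_eq_getElem_cons (by omega)
  have hd2 : s.drop (i.toNat + 1) = s[i.toNat + 1] :: s.drop (i.toNat + 2) :=
    List.drop_eq_getElem_cons hk1
  have hg1 : PySem.List.pyGetD s i 0 = s[i.toNat] :=
    PySem.List.pyGetD_eq_getElem s 0 h0 (by omega)
  have hg2 : PySem.List.pyGetD s (i + 1) 0 = s[i.toNat + 1] := by
    rw [PySem.List.pyGetD_eq_getElem s 0 (by omega) (by omega)]
    congr 1
    omega
  unfold stepB
  simp only [hg1, hg2]
  refine Prod.ext rfl ?_
  show (0 :: _) = _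
  apply List.ext_getElem
  · simp [rowOf_length, PySem.List.length_pyRange_one, hp]
  · intro j hj1 hj2
    rw [rowOf_length] at hj2
    match j with
    | 0 =>
      show (0 : Int) = (rowOf I P (s.drop i.toNat))[0]
      simp [rowOf, fD]
    | j + 1 =>
      have hjP : j < P := by
        simp only [List.length_cons, List.length_map, PySem.List.length_pyRange_one, hp] at hj1
        omega
      have hidx : (PySem.List.pyRange 1 (p + 1) 1)[j]'(by
          rw [PySem.List.length_pyRange_one]; omega) = 1 + (j : Int) :=
        PySem.List.getElem_pyRange_one _ _ _ _
      simp only [List.getElem_cons_succ, List.getElem_map, hidx]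
      rw [rowOf_get I P _ (1 + (j : Int)) (by omega) (by omega)]
      rw [show (1 : Int) + (j : Int) - 1 = (j : Int) by omega]
      rw [rowOf_get I P _ (j : Int) (by omega) (by omega)]
      rw [show (1 + (j : Int)).toNat = j + 1 by omega, Int.toNat_natCast]
      rw [show (i + 1).toNat = i.toNat + 1 by omega, show (i + 2).toNat = i.toNat + 2 by omega]
      show _ = (rowOf I P (s.drop i.toNat))[j + 1]'(by rw [rowOf_length]; omega)
      simp only [rowOf, List.getElem_map, List.getElem_range]
      rw [hd1, hd2]
      rfl

theorem foldB (s : List Int) (p I : Int) (P : Nat) (hp : p = (P : Int)) :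
    ∀ (m : Nat) (i : Int), (i + 1).toNat ≤ m → -1 ≤ i → i ≤ (s.length : Int) - 2 →
      ((PySem.List.pyRange i (-1) (-1)).foldl (stepB s p)
        (rowOf I P (s.drop (i + 2).toNat), rowOf I P (s.drop (i + 1).toNat))).2 = rowOf I P s := by
  intro m
  induction m with
  | zero =>
    intro i hm h1 h2
    have hi : i = -1 := by omega
    subst hi
    rw [PySem.List.pyRange_neg_one_eq_nil (by omega)]
    simp only [List.foldl_nil]
    rw [show ((-1 : Int) + 1).toNat = 0 by omega, List.drop_zero]
  | succ m ih =>
    intro i hm h1 h2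
    by_cases hi : -1 < i
    · rw [PySem.List.pyRange_neg_one_cons (by omega), List.foldl_cons]
      rw [stepB_row s p I P hp i (by omega) h2]
      have := ih (i - 1) (by omega) (by omega) (by omega)
      rw [show i - 1 + 2 = i + 1 by ring, show i - 1 + 1 = i by ring] at this
      exact this
    · have hi' : i = -1 := by omega
      subst hi'
      rw [PySem.List.pyRange_neg_one_eq_nil (by omega)]
      simp only [List.foldl_nil]
      rw [show ((-1 : Int) + 1).toNat = 0 by omega, List.drop_zero]

theorem check_iff_aux (s : List Int) (p thr : Int) (hs : s.Pairwise (· ≤ ·)) :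
    ∀ (fuel : Nat) (i c : Int), 0 ≤ i → (s.length : Int) - i ≤ fuel →
      (minimizeMaxCheck s p thr fuel i c = true ↔ c < p ∧ p ≤ c + cntP thr (s.drop i.toNat)) := by
  intro fuel
  induction fuel with
  | zero =>
    intro i c h0 hm
    simp only [minimizeMaxCheck]
    rw [List.drop_eq_nil_of_le (by omega)]
    simp only [cntP]
    constructor
    · intro h; exact absurd h (by simp)
    · intro h; omega
  | succ fuel ih =>
    intro i c h0 hm
    by_cases hlt : i < (s.length : Int) - 1
    · have hk : i.toNat + 1 < s.length := by omega
      have hg1 : PySem.List.pyGetD s i 0 = s[i.toNat] :=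
        PySem.List.pyGetD_eq_getElem s 0 h0 (by omega)
      have hg2 : PySem.List.pyGetD s (i + 1) 0 = s[i.toNat + 1] := by
        rw [PySem.List.pyGetD_eq_getElem s 0 (show (0:Int) ≤ i + 1 by omega) (by omega)]
        congr 1
        omega
      have hle : s[i.toNat] ≤ s[i.toNat + 1] :=
        List.pairwise_iff_getElem.mp hs i.toNat (i.toNat + 1) (by omega) hk (by omega)
      have habs : |PySem.List.pyGetD s i 0 - PySem.List.pyGetD s (i + 1) 0| =
          s[i.toNat + 1] - s[i.toNat] := by
        rw [hg1, hg2, abs_sub_comm, abs_of_nonneg (by omega)]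
      have hd1 : s.drop i.toNat = s[i.toNat] :: s.drop (i.toNat + 1) :=
        List.drop_eq_getElem_cons (by omega)
      have hd2 : s.drop (i.toNat + 1) = s[i.toNat + 1] :: s.drop (i.toNat + 2) :=
        List.drop_eq_getElem_cons hk
      have hcnt : cntP thr (s.drop i.toNat) =
          if s[i.toNat + 1] - s[i.toNat] ≤ thr then cntP thr (s.drop (i.toNat + 2)) + 1
          else cntP thr (s.drop (i.toNat + 1)) := by
        rw [hd1, hd2]
        rw [show ∀ (x y : Int) (r : List Int), cntP thr (x :: y :: r) =
              if y - x ≤ thr then cntP thr r + 1 else cntP thr (y :: r) from fun x y r => rfl]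
        try rw [← hd2]
      simp only [minimizeMaxCheck]
      rw [if_pos hlt, habs]
      by_cases hth : s[i.toNat + 1] - s[i.toNat] ≤ thr
      · rw [if_pos hth]
        rw [hcnt, if_pos hth]
        by_cases hcp : c + 1 = p
        · rw [if_pos hcp]
          have := cntP_nonneg thr (s.drop (i.toNat + 2))
          simp only [true_iff]
          omega
        · rw [if_neg hcp]
          have hih := ih (i + 2) (c + 1) (by omega) (by omega)
          rw [show (i + 2).toNat = i.toNat + 2 by omega] at hih
          rw [hih]
          omega
      · rw [if_neg hth]
        rw [hcnt, if_neg hth]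
        have hih := ih (i + 1) c (by omega) (by omega)
        rw [show (i + 1).toNat = i.toNat + 1 by omega] at hih
        rw [hih]
    · simp only [minimizeMaxCheck]
      rw [if_neg hlt]
      have : cntP thr (s.drop i.toNat) = 0 := by
        apply cntP_short
        have := s.length_drop (i := i.toNat)
        omega
      rw [this]
      constructor
      · intro h; exact absurd h (by simp)
      · intro h; omega

theorem check_iff (s : List Int) (p thr : Int) (hs : s.Pairwise (· ≤ ·)) :
    minimizeMaxCheck s p thr s.length 0 0 = true ↔ 0 < p ∧ p ≤ cntP thr s := by
  have := check_iff_aux s p thr hs (s.length) 0 0 (by omega) (by omega)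
  simpa using this

theorem bsLoop_post_aux (s : List Int) (p R : Int)
    (hmono : ∀ t t', t ≤ t' → minimizeMaxCheck s p t s.length 0 0 = true → minimizeMaxCheck s p t' s.length 0 0 = true) :
    ∀ (m : Nat) (l r res : Int), (r - l + 1).toNat ≤ m → 0 ≤ l → -1 ≤ r → r ≤ R →
      (∀ t, 0 ≤ t → t < l → ¬ minimizeMaxCheck s p t s.length 0 0 = true) →
      (∀ t, r < t → t ≤ R → minimizeMaxCheck s p t s.length 0 0 = true) →
      (r < R → res = r + 1) → (r = R → res = 0) →
      ((minimizeMaxLoop s p m l r res = 0 ∧ ∀ t, 0 ≤ t → t ≤ R → ¬ minimizeMaxCheck s p t s.length 0 0 = true) ∨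
       (0 ≤ minimizeMaxLoop s p m l r res ∧ minimizeMaxLoop s p m l r res ≤ R ∧
        minimizeMaxCheck s p (minimizeMaxLoop s p m l r res) s.length 0 0 = true ∧
        ∀ t, 0 ≤ t → t < minimizeMaxLoop s p m l r res → ¬ minimizeMaxCheck s p t s.length 0 0 = true)) := by
  intro m
  induction m with
  | zero =>
    intro l r res hm hl hr1 hrR hlow hhigh hres1 hres2
    simp only [minimizeMaxLoop]
    by_cases hcase : r = R
    · left
      refine ⟨hres2 hcase, ?_⟩
      intro t h0 htR
      exact hlow t h0 (by omega)
    · right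
      have hrR' : r < R := by omega
      have hres : res = r + 1 := hres1 hrR'
      refine ⟨by omega, by omega, ?_, ?_⟩
      · rw [hres]; exact hhigh (r + 1) (by omega) (by omega)
      · intro t h0 ht
        exact hlow t h0 (by omega)
  | succ m ih =>
    intro l r res hm hl hr1 hrR hlow hhigh hres1 hres2
    by_cases hlr : l ≤ r
    · have hmid := PySem.Int.floordiv_two_mid_bounds (show l ≤ r from hlr)
      simp only [minimizeMaxLoop]
      rw [if_pos hlr]
      set mid := PySem.Int.floordiv (l + r) 2 with hmiddef
      by_cases hchk : minimizeMaxCheck s p mid s.length 0 0 = true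
      · rw [if_pos hchk]
        apply ih l (mid - 1) mid (by omega) (by omega) (by omega) (by omega) hlow
        · intro t ht htR
          exact hmono mid t (by omega) hchk
        · intro _; omega
        · intro h; exfalso; omega
      · rw [if_neg hchk]
        apply ih (mid + 1) r res (by omega) (by omega) (by omega) hrR _ hhigh hres1 hres2
        intro t h0 ht
        by_cases htl : t < l
        · exact hlow t h0 htl
        · intro habs
          exact hchk (hmono t mid (by omega) habs)
    · simp only [minimizeMaxLoop]
      rw [if_neg hlr]
      by_cases hcase : r = R
      · left
        refine ⟨hres2 hcase, ?_⟩
        intro t h0 htR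
        exact hlow t h0 (by omega)
      · right
        have hrR' : r < R := by omega
        have hres : res = r + 1 := hres1 hrR'
        refine ⟨by omega, by omega, ?_, ?_⟩
        · rw [hres]; exact hhigh (r + 1) (by omega) (by omega)
        · intro t h0 ht
          exact hlow t h0 (by omega)

theorem main_eq (nums : List Int) (p : Int) (hpre : nums ≠ []) :
    minimizeMax nums p = minimizeMax_alt nums p := by
  simp only [minimizeMax, minimizeMax_alt]
  set s := PySem.List.sorted nums (fun x => x) false with hsdef
  have hsne : s ≠ [] := by
    rw [hsdef]
    intro h
    exact hpre ((PySem.List.sorted_eq_nil_iff nums (fun x => x) false).mp h)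
  have hn1 : 1 ≤ s.length := List.length_pos_iff.mpr hsne
  have hs : s.Pairwise (· ≤ ·) := by
    have := PySem.List.sorted_pairwise nums (fun x => x)
    simpa using this
  have hmono_s : ∀ (a b : Nat) (ha : a < s.length) (hb : b < s.length), a ≤ b → s[a] ≤ s[b] := by
    intro a b ha hb hab
    rcases eq_or_lt_of_le hab with rfl | hlt
    · exact le_refl _
    · exact List.pairwise_iff_getElem.mp hs a b ha hb hlt
  have hlast : PySem.List.pyGetD s (-1) 0 = s[s.length - 1]'(by omega) := by
    rw [PySem.List.pyGetD_neg_one s 0 hsne]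
    exact List.getLast_eq_getElem hsne
  have hfirst : PySem.List.pyGetD s 0 0 = s[0] := by
    rw [PySem.List.pyGetD_eq_getElem s 0 (by omega) (by omega)]
    congr 1
  rw [hlast, hfirst]
  set R := s[s.length - 1]'(by omega) - s[0] with hRdef
  have hR0 : 0 ≤ R := by
    have := hmono_s 0 (s.length - 1) (by omega) (by omega) (by omega)
    omega
  have hdmem : ∀ d ∈ adif s, 0 ≤ d ∧ d ≤ R := by
    intro d hd
    obtain ⟨k, hk, rfl⟩ := (mem_adif s d).mp hd
    have h1 := hmono_s k (k + 1) (by omega) hk (by omega)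
    have h2 := hmono_s (k + 1) (s.length - 1) hk (by omega) (by omega)
    have h3 := hmono_s 0 k (by omega) (by omega) (by omega)
    omega
  have hchk : ∀ t : Int, minimizeMaxCheck s p t s.length 0 0 = true ↔ 0 < p ∧ p ≤ cntP t s :=
    fun t => check_iff s p t hs
  have hAmono : ∀ t t', t ≤ t' → minimizeMaxCheck s p t s.length 0 0 = true →
      minimizeMaxCheck s p t' s.length 0 0 = true := by
    intro t t' htt h
    rw [hchk] at h ⊢
    have := cntP_mono t t' htt s
    omega
  obtain postA :=
    bsLoop_post_aux s p R hAmono (R + 1).toNat 0 R 0 (by omega) (by omega) (by omega) (by omega)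
      (by intro t h1 h2; omega)
      (by intro t h1 h2; exfalso; omega)
      (by intro h; exfalso; omega)
      (by intro _; rfl)
  set A := minimizeMaxLoop s p (R + 1).toNat 0 R 0 with hAdef
  by_cases hB : p ≤ 0 ∨ 2 * p > (s.length : Int)
  · rw [if_pos hB]
    rcases postA with ⟨hA0, _⟩ | ⟨hA0, hAR, hAchk, hAmin⟩
    · exact hA0
    · rw [hchk] at hAchk
      obtain ⟨hp, hcnt⟩ := hAchk
      rcases hB with hB | hB
      · omega
      · have := cntP_le_half A s
        omega
  · rw [if_neg hB]
    push_neg at hB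
    obtain ⟨hp, hfeas⟩ := hB
    have hn2 : 2 ≤ s.length := by omega
    set P := p.toNat with hPdef
    have hpP : p = (P : Int) := by omega
    set I := R + 1 with hIdef
    -- reduce B's fold to the DP value fD I s P
    have hinit1 : (0 :: List.replicate P I) = rowOf I P (s.drop (((s.length : Int) - 2) + 2).toNat) := by
      rw [show (((s.length : Int) - 2) + 2).toNat = s.length by omega]
      rw [List.drop_length]
      exact init_row I P [] (by simp)
    have hinit2 : (0 :: List.replicate P I) = rowOf I P (s.drop (((s.length : Int) - 2) + 1).toNat) := by
      rw [show (((s.length : Int) - 2) + 1).toNat = s.length - 1 by omega]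
      have hd : s.drop (s.length - 1) = [s[s.length - 1]'(by omega)] := by
        rw [List.drop_eq_getElem_cons (by omega)]
        rw [show s.length - 1 + 1 = s.length by omega, List.drop_length]
      rw [hd]
      exact init_row I P _ (by simp)
    have hfold :
        ((PySem.List.pyRange ((s.length : Int) - 2) (-1) (-1)).foldl (stepB s p)
          (0 :: List.replicate P I, 0 :: List.replicate P I)).2 = rowOf I P s := by
      have hpair : ((0 :: List.replicate P I : List Int), (0 :: List.replicate P I : List Int))
          = (rowOf I P (s.drop (((s.length : Int) - 2) + 2).toNat),
             rowOf I P (s.drop (((s.length : Int) - 2) + 1).toNat)) := by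
        rw [← hinit1, ← hinit2]
      rw [hpair]
      exact foldB s p I P hpP (((s.length : Int) - 2) + 1).toNat ((s.length : Int) - 2)
        (by omega) (by omega) (by omega)
    rw [hfold]
    rw [rowOf_get I P s p (by omega) (by omega)]
    set r := fD I s P with hrdef
    -- A's characterization: infeasibility at R is impossible since 2p ≤ n
    have hfeasR : p ≤ cntP R s := by
      have := cntP_ge_of_all_le R s (fun d hd => (hdmem d hd).2)
      omega
    rcases postA with ⟨_, hnone⟩ | ⟨hA0, hAR, hAchk, hAmin⟩
    · exact absurd ((hchk R).mpr ⟨hp, hfeasR⟩) (hnone R hR0 (le_refl R))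
    · rw [hchk] at hAchk
      have h1 : r ≤ A := by
        rw [hrdef]
        exact (fD_le_iff I A hA0 (by omega) s P).mpr (by omega)
      have hr0 : 0 ≤ r := fD_nonneg I (by omega) s hs P
      have h2 : p ≤ cntP r s := by
        have := (fD_le_iff I r hr0 (by omega) s P).mp (le_refl r)
        omega
      have h3 : A ≤ r := by
        by_contra hcon
        exact hAmin r hr0 (by omega) ((hchk r).mpr ⟨hp, h2⟩)
      omega

-- ===== VERDICT (by name: the statement is the Claim_ definition above) =====
theorem minimizeMax_spec : Claim_equal_minimizeMax := by
  intro nums p _ hpre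
  unfold Spec_minimizeMax
  exact main_eq nums p hpre

@[simp] theorem minimizeMax_raises : Claim_raises_minimizeMax := by
  unfold Claim_raises_minimizeMax
  exact ⟨fun nums p _ h hp => hp h, by decide, by decide, by decide⟩
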